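-- pv_equiv track=rewrite | github.com/sandhyapnp/debate-agent | agents/topic_selector.py | _suggest_topics_based_on_input
-- ===== SOURCE A (Python) =====
-- from typing import Dict, Any, List
--
-- def _suggest_topics_based_on_input(user_input: str) -> List[str]:
--     user_lower = user_input.lower()
--
--     if any(word in user_lower for word in ["tech", "ai", "artificial", "computer", "software"]):
--         return [
--             "Artificial Intelligence should replace human decision-making in healthcare",
--             "Social media platforms should be held responsible for misinformation",
--             "Remote work is more productive than office work"
--         ]
--     elif any(word in user_lower for word in ["environment", "climate", "green", "nature"]):
--         return [
--             "Nuclear energy is the best solution to climate change",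
--             "Individual actions matter more than corporate responsibility for environment",
--             "Economic growth should be prioritized over environmental protection"
--         ]
--     elif any(word in user_lower for word in ["education", "school", "learning", "student"]):
--         return [
--             "Standardized testing accurately measures student ability",
--             "College education is worth the debt",
--             "Online learning is as effective as in-person education"
--         ]
--     else:
--         return [
--             "Social media does more harm than good",
--             "Universal basic income would solve poverty",
--             "Space exploration funding should be redirected to Earth problems"
--         ]
-- ===== SOURCE B (Python) =====
-- from typing import List
--
-- # Flat keyword -> category-index table; topics looked up by index; the
-- # winning category is the MINIMUM matching index (groups earlier in A's
-- # ladder have smaller indices, so min reproduces first-match priority).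
-- _KEYWORD_CATEGORY = {
--     "tech": 0, "ai": 0, "artificial": 0, "computer": 0, "software": 0,
--     "environment": 1, "climate": 1, "green": 1, "nature": 1,
--     "education": 2, "school": 2, "learning": 2, "student": 2,
-- }
--
-- _TOPIC_TABLE = [
--     ["Artificial Intelligence should replace human decision-making in healthcare",
--      "Social media platforms should be held responsible for misinformation",
--      "Remote work is more productive than office work"],
--     ["Nuclear energy is the best solution to climate change",
--      "Individual actions matter more than corporate responsibility for environment",
--      "Economic growth should be prioritized over environmental protection"],
--     ["Standardized testing accurately measures student ability",
--      "College education is worth the debt",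
--      "Online learning is as effective as in-person education"],
--     ["Social media does more harm than good",
--      "Universal basic income would solve poverty",
--      "Space exploration funding should be redirected to Earth problems"],
-- ]
--
-- def _suggest_topics_based_on_input(user_input: str) -> List[str]:
--     user_lower = user_input.lower()
--     best = 3  # index of the default topic list
--     for word, cat in _KEYWORD_CATEGORY.items():
--         if cat < best and word in user_lower:
--             best = cat
--     return _TOPIC_TABLE[best]
-- ===== Notes on version B (the rewrite author's own statement) =====
-- stated objective: alternative
-- what changed: Replaced the if/elif ladder (with early returns per keyword group) by a single-pass minimum-accumulator over a flat keyword-to-category-index dict, then one lookup into an indexed topic table; min over indices reproduces the ladder's first-match priority.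
import Mathlib
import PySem

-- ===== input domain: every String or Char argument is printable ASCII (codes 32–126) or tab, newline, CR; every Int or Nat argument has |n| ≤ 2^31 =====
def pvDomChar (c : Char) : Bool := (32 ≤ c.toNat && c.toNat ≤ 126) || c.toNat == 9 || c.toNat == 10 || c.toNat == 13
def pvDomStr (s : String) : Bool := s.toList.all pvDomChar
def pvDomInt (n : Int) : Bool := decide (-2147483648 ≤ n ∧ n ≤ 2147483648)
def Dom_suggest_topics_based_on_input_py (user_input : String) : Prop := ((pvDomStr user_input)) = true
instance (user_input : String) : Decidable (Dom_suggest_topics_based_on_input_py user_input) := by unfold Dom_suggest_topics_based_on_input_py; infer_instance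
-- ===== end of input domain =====

-- B replaces A's if/elif ladder by a min-accumulator pass over a flat keyword→category dict
-- plus an indexed topic table (alternative decomposition; same cost).

-- ===== PORT A =====
def suggest_topics_based_on_input_py (user_input : String) : List String :=
  let user_lower := PySem.Str.lower user_input
  if (["tech", "ai", "artificial", "computer", "software"] : List String).any
      (fun word => PySem.Str.isIn word user_lower) then
    ["Artificial Intelligence should replace human decision-making in healthcare",
     "Social media platforms should be held responsible for misinformation",
     "Remote work is more productive than office work"]
  else if (["environment", "climate", "green", "nature"] : List String).any
      (fun word => PySem.Str.isIn word user_lower) then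
    ["Nuclear energy is the best solution to climate change",
     "Individual actions matter more than corporate responsibility for environment",
     "Economic growth should be prioritized over environmental protection"]
  else if (["education", "school", "learning", "student"] : List String).any
      (fun word => PySem.Str.isIn word user_lower) then
    ["Standardized testing accurately measures student ability",
     "College education is worth the debt",
     "Online learning is as effective as in-person education"]
  else
    ["Social media does more harm than good",
     "Universal basic income would solve poverty",
     "Space exploration funding should be redirected to Earth problems"]

-- ===== PORT B =====
-- the dict _KEYWORD_CATEGORY as an association list in insertion order
def pvKeywordCategory : List (String × Nat) :=
  [("tech", 0), ("ai", 0), ("artificial", 0), ("computer", 0), ("software", 0),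
   ("environment", 1), ("climate", 1), ("green", 1), ("nature", 1),
   ("education", 2), ("school", 2), ("learning", 2), ("student", 2)]

def pvTopicTable : List (List String) :=
  [["Artificial Intelligence should replace human decision-making in healthcare",
    "Social media platforms should be held responsible for misinformation",
    "Remote work is more productive than office work"],
   ["Nuclear energy is the best solution to climate change",
    "Individual actions matter more than corporate responsibility for environment",
    "Economic growth should be prioritized over environmental protection"],
   ["Standardized testing accurately measures student ability",
    "College education is worth the debt",
    "Online learning is as effective as in-person education"],
   ["Social media does more harm than good",
    "Universal basic income would solve poverty",
    "Space exploration funding should be redirected to Earth problems"]]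

def suggest_topics_based_on_input_py_alt (user_input : String) : List String :=
  let user_lower := PySem.Str.lower user_input
  let best := pvKeywordCategory.foldl
    (fun best wc => if wc.2 < best && PySem.Str.isIn wc.1 user_lower then wc.2 else best) 3
  -- best ≤ 3 always, so the index is in range and the getD default is never used
  (PySem.List.pyGet? pvTopicTable (Int.ofNat best)).getD []

-- ===== PRECONDITION & SPEC =====
def Spec_suggest_topics_based_on_input_py (user_input : String) (out : List String) : Prop := out = suggest_topics_based_on_input_py_alt user_input
instance (user_input : String) (out : List String) : Decidable (Spec_suggest_topics_based_on_input_py user_input out) := by unfold Spec_suggest_topics_based_on_input_py; infer_instance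

-- ===== CLAIM =====
def Claim_equal_suggest_topics_based_on_input_py : Prop := ∀ (user_input : String), Dom_suggest_topics_based_on_input_py user_input → Spec_suggest_topics_based_on_input_py user_input (suggest_topics_based_on_input_py user_input)

-- ===== LEMMAS AND PROOFS =====

-- folding B's accumulator step over one keyword group of constant category c
theorem pvFoldGroup (s : String) (c best : Nat) (ws : List String) :
    (ws.map (fun w => (w, c))).foldl
      (fun best wc => if wc.2 < best && PySem.Str.isIn wc.1 s then wc.2 else best) best
    = if c < best ∧ (ws.any (fun w => PySem.Str.isIn w s)) = true then c else best := by
  induction ws generalizing best with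
  | nil => simp
  | cons w ws ih =>
    simp only [List.map_cons, List.foldl_cons, List.any_cons]
    by_cases hin : PySem.Str.isIn w s = true
    · simp only [hin]
      by_cases hlt : c < best
      · rw [if_pos (by simp [hlt]), ih]
        simp [hlt]
      · rw [if_neg (by simp [hlt]), ih]
        simp [hlt]
    · rw [Bool.not_eq_true] at hin
      simp only [hin]
      rw [if_neg (by simp), ih]
      simp

-- the flat dict is the three groups in ladder order
theorem pvKeywordCategory_eq :
    pvKeywordCategory =
      (["tech", "ai", "artificial", "computer", "software"].map (fun w => (w, 0)))
      ++ (["environment", "climate", "green", "nature"].map (fun w => (w, 1)))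
      ++ (["education", "school", "learning", "student"].map (fun w => (w, 2))) := rfl

-- ===== VERDICT =====
theorem suggest_topics_based_on_input_py_spec : Claim_equal_suggest_topics_based_on_input_py := by
  intro user_input _
  unfold Spec_suggest_topics_based_on_input_py suggest_topics_based_on_input_py
    suggest_topics_based_on_input_py_alt
  rw [pvKeywordCategory_eq]
  simp only [List.foldl_append, pvFoldGroup]
  by_cases h1 : (["tech", "ai", "artificial", "computer", "software"] : List String).any
      (fun word => PySem.Str.isIn word (PySem.Str.lower user_input)) = true <;>
  by_cases h2 : (["environment", "climate", "green", "nature"] : List String).any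
      (fun word => PySem.Str.isIn word (PySem.Str.lower user_input)) = true <;>
  by_cases h3 : (["education", "school", "learning", "student"] : List String).any
      (fun word => PySem.Str.isIn word (PySem.Str.lower user_input)) = true <;>
  simp only [h1, h2, h3, Bool.not_eq_true] at * <;>
  norm_num [pvTopicTable, PySem.List.pyGet?, PySem.List.pyIdx?] <;>
  simp_all
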